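-- pv_equiv track=rewrite | github.com/Kentle/dataIsBeautiful-ocr | img_preprocess.py | split_projection_list
-- ===== SOURCE A (Python) =====
-- def split_projection_list(projectionList: list, minValue=0):
--     start = 0
--     end = None
--
--     split_list = []
--     for idx, value in enumerate(projectionList):
--         if value > minValue:
--             end = idx
--         else:
--             if end is not None:
--                 split_list.append((start, end))
--                 end = None
--             start = idx
--     # else:
--     #     if end is not None:
--     #         split_list.append((start, end))
--     #         end = None
--     return split_list
-- ===== SOURCE B (Python) =====
-- def split_projection_list(projectionList: list, minValue=0):
--     # Two-phase: materialize maximal runs of (value > minValue), then emit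
--     # intervals for above-threshold runs that do not reach the end of the list.
--     runs = []
--     n = len(projectionList)
--     i = 0
--     while i < n:
--         key = projectionList[i] > minValue
--         j = i + 1
--         while j < n and (projectionList[j] > minValue) == key:
--             j += 1
--         runs.append((key, i, j - 1))
--         i = j
--     return [((s - 1) if s > 0 else 0, e) for key, s, e in runs
--             if key and e < n - 1]
-- ===== Notes on version B (the rewrite author's own statement) =====
-- stated objective: alternative
-- what changed: Replaces A's single stateful scan (start/end/append bookkeeping) with a two-phase run decomposition: first materialize maximal runs of (value > minValue) as (key, start, end) triples, then emit (start-1 if start>0 else 0, end) for each above-threshold run that does not reach the last index.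
import Mathlib
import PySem

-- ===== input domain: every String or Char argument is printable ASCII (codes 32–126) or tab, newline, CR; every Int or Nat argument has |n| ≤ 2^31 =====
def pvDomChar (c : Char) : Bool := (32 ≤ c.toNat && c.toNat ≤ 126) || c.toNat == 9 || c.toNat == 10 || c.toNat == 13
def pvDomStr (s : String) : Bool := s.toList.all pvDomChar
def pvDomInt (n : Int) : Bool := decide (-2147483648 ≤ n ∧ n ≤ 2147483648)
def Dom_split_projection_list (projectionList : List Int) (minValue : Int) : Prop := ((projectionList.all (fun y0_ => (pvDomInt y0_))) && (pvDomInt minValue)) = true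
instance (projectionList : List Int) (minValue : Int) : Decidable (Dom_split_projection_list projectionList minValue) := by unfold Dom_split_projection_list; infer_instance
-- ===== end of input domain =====

-- B re-implements A as a two-phase run decomposition (materialize maximal runs, then
-- filter/map them); equal return value on all inputs (objective: alternative).

-- ===== PORT A =====
-- A's single loop over enumerate(projectionList) with state (start, end : Option, split_list)
def splitLoopA (m : Int) : List Int → Int → Int × Option Int × List (Int × Int) → Int × Option Int × List (Int × Int)
  | [], _, s => s
  | v :: rest, idx, (start, endo, acc) =>
    splitLoopA m rest (idx + 1)
      (if v > m then (start, some idx, acc)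
       else match endo with
         | some e => (idx, none, acc ++ [(start, e)])
         | none => (idx, none, acc))

def split_projection_list (projectionList : List Int) (minValue : Int) : List (Int × Int) :=
  (splitLoopA minValue projectionList 0 (0, none, [])).2.2

-- ===== PORT B =====
-- B phase 1: maximal runs of the key (value > minValue), as (key, startIdx, endIdx)
def runsB (m : Int) : List Int → Int → List (Bool × Int × Int)
  | [], _ => []
  | x :: xs, i =>
    let key : Bool := decide (x > m)
    let grp := xs.takeWhile (fun y => decide (y > m) == key)
    let j : Int := 1 + grp.length
    (key, i, i + j - 1) :: runsB m (xs.drop grp.length) (i + j)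
termination_by l => l.length
decreasing_by simp

-- B phase 2: keep above-threshold runs not reaching the last index
def filtB (L : Int) (rs : List (Bool × Int × Int)) : List (Int × Int) :=
  rs.filterMap (fun t =>
    if t.1 = true ∧ t.2.2 < L - 1 then some ((if t.2.1 > 0 then t.2.1 - 1 else 0), t.2.2)
    else none)

def split_projection_list_alt (projectionList : List Int) (minValue : Int) : List (Int × Int) :=
  filtB (projectionList.length : Int) (runsB minValue projectionList 0)

-- ===== PRECONDITION & SPEC =====
def Spec_split_projection_list (projectionList : List Int) (minValue : Int) (out : List (Int × Int)) : Prop := out = split_projection_list_alt projectionList minValue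
instance (projectionList : List Int) (minValue : Int) (out : List (Int × Int)) : Decidable (Spec_split_projection_list projectionList minValue out) := by unfold Spec_split_projection_list; infer_instance

-- ===== CLAIM (what is proved, stated in full; the proofs are below) =====
def Claim_equal_split_projection_list : Prop := ∀ (projectionList : List Int) (minValue : Int), Dom_split_projection_list projectionList minValue → Spec_split_projection_list projectionList minValue (split_projection_list projectionList minValue)

-- ===== LEMMAS AND PROOFS =====

-- Boolean predicate normalization for runsB's group key
theorem pred_true_eq (m : Int) :
    (fun y : Int => decide (y > m) == true) = (fun y : Int => decide (y > m)) := by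
  funext y; cases h : decide (y > m) <;> rfl

-- takeWhile / dropWhile bookkeeping
theorem tw_dw_length (p : Int → Bool) (l : List Int) :
    (l.takeWhile p).length + (l.dropWhile p).length = l.length := by
  have h := congrArg List.length (List.takeWhile_append_dropWhile (p := p) (l := l))
  simp only [List.length_append] at h
  exact h

theorem drop_tw_length (p : Int → Bool) (l : List Int) :
    l.drop (l.takeWhile p).length = l.dropWhile p := by
  calc l.drop (l.takeWhile p).length
      = (l.takeWhile p ++ l.dropWhile p).drop (l.takeWhile p).length := by
        rw [List.takeWhile_append_dropWhile]
    _ = l.dropWhile p := List.drop_left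

theorem dw_head_false (p : Int → Bool) :
    ∀ (l : List Int) (w : Int) (d : List Int), l.dropWhile p = w :: d → p w = false := by
  intro l
  induction l with
  | nil => intro w d h; simp [List.dropWhile] at h
  | cons v l' ih =>
    intro w d h
    by_cases hv : p v
    · rw [List.dropWhile_cons, if_pos hv] at h
      exact ih w d h
    · rw [List.dropWhile_cons, if_neg hv] at h
      injection h with h1 h2
      subst h1
      simpa using hv

-- one unfolding step of runsB on a cons
theorem runsB_cons (m x : Int) (xs : List Int) (i : Int) :
    runsB m (x :: xs) i =
      (decide (x > m), i,
        i + (1 + ((xs.takeWhile (fun y => decide (y > m) == decide (x > m))).length : Int)) - 1)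
        :: runsB m (xs.drop (xs.takeWhile (fun y => decide (y > m) == decide (x > m))).length)
             (i + (1 + ((xs.takeWhile (fun y => decide (y > m) == decide (x > m))).length : Int))) := by
  rw [runsB]

-- filtB steps: an emitted above run, a below run, a run reaching the last index
theorem filtB_cons_true (L s e : Int) (rs : List (Bool × Int × Int)) (hc : e < L - 1) :
    filtB L ((true, s, e) :: rs) = ((if 0 < s then s - 1 else 0), e) :: filtB L rs := by
  simp [filtB, hc]

theorem filtB_cons_false (L s e : Int) (rs : List (Bool × Int × Int)) :
    filtB L ((false, s, e) :: rs) = filtB L rs := by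
  simp [filtB]

theorem filtB_cons_last (L s e : Int) (rs : List (Bool × Int × Int)) (hc : ¬ e < L - 1) :
    filtB L ((true, s, e) :: rs) = filtB L rs := by
  simp [filtB, hc]

-- A's loop without the accumulator (emitted pairs only)
def emitA (m : Int) : List Int → Int → Int → Option Int → List (Int × Int)
  | [], _, _, _ => []
  | v :: rest, idx, start, endo =>
    if v > m then emitA m rest (idx + 1) start (some idx)
    else match endo with
      | some e => (start, e) :: emitA m rest (idx + 1) idx none
      | none => emitA m rest (idx + 1) idx none

theorem splitLoopA_emitA (m : Int) (l : List Int) :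
    ∀ (idx start : Int) (endo : Option Int) (acc : List (Int × Int)),
      (splitLoopA m l idx (start, endo, acc)).2.2 = acc ++ emitA m l idx start endo := by
  induction l with
  | nil => intro idx start endo acc; simp [splitLoopA, emitA]
  | cons v rest ih =>
    intro idx start endo acc
    by_cases h : v > m
    · simp [splitLoopA, emitA, h, ih]
    · cases endo with
      | some e => simp [splitLoopA, emitA, h, ih]
      | none => simp [splitLoopA, emitA, h, ih]

-- in a run state, a trailing all-above rest emits nothing
theorem emitA_run_nil (m : Int) :
    ∀ (r : List Int), r.dropWhile (fun y => decide (y > m)) = [] →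
      ∀ (j st e : Int), emitA m r j st (some e) = [] := by
  intro r
  induction r with
  | nil => intro _ j st e; simp [emitA]
  | cons v rest ih =>
    intro h j st e
    by_cases hv : v > m
    · rw [List.dropWhile_cons, if_pos (by simpa using hv)] at h
      rw [show emitA m (v :: rest) j st (some e) = emitA m rest (j + 1) st (some j) from by
        simp [emitA, hv]]
      exact ih h (j + 1) st j
    · rw [List.dropWhile_cons, if_neg (by simpa using hv)] at h
      simp at h

-- in a run state at index j with pending end j-1: A emits (st, last index of the run)
-- at the first below element, then continues from it in the `none` state
theorem emitA_run_cons (m : Int) :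
    ∀ (r : List Int) (w : Int) (d' : List Int),
      r.dropWhile (fun y => decide (y > m)) = w :: d' →
      ∀ (j st e : Int), e = j - 1 →
        emitA m r j st (some e) =
          (st, j - 1 + ((r.takeWhile (fun y => decide (y > m))).length : Int)) ::
            emitA m d' (j + ((r.takeWhile (fun y => decide (y > m))).length : Int) + 1)
              (j + ((r.takeWhile (fun y => decide (y > m))).length : Int)) none := by
  intro r
  induction r with
  | nil => intro w d' h; simp [List.dropWhile] at h
  | cons v rest ih =>
    intro w d' h j st e he
    by_cases hv : v > m
    · rw [List.dropWhile_cons, if_pos (by simpa using hv)] at h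
      rw [show emitA m (v :: rest) j st (some e) = emitA m rest (j + 1) st (some j) from by
        simp [emitA, hv]]
      rw [ih w d' h (j + 1) st j (by ring)]
      rw [List.takeWhile_cons, if_pos (by simpa using hv)]
      simp only [List.length_cons]
      push_cast
      ring_nf
    · rw [List.dropWhile_cons, if_neg (by simpa using hv)] at h
      injection h with h1 h2
      subst h1; subst h2
      rw [show emitA m (v :: rest) j st (some e) = (st, e) :: emitA m rest (j + 1) j none from by
        simp [emitA, hv]]
      rw [List.takeWhile_cons, if_neg (by simpa using hv)]
      rw [he]
      simp only [List.length_nil]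
      push_cast
      ring_nf

-- dropping a leading below-threshold element does not change the filtered runs
theorem filtB_below (m L : Int) (v : Int) (r : List Int) (i : Int) (h : ¬ v > m) :
    filtB L (runsB m (v :: r) i) = filtB L (runsB m r (i + 1)) := by
  have hk : decide (v > m) = false := by simpa using h
  rw [runsB_cons]
  simp only [hk]
  rw [filtB_cons_false]
  cases r with
  | nil => simp [runsB, filtB]
  | cons w r' =>
    by_cases hw : w > m
    · have h0 : (w :: r').takeWhile (fun y => decide (y > m) == false) = [] := by
        rw [List.takeWhile_cons, if_neg (by simp [hw])]
      rw [h0]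
      simp only [List.length_nil, Nat.cast_zero, List.drop_zero]
      norm_num
    · have hw' : decide (w > m) = false := by simpa using hw
      have h0 : (w :: r').takeWhile (fun y => decide (y > m) == false)
          = w :: r'.takeWhile (fun y => decide (y > m) == false) := by
        rw [List.takeWhile_cons, if_pos (by simp [hw'])]
      rw [h0]
      conv_rhs => rw [runsB_cons]
      simp only [hw']
      conv_rhs => rw [filtB_cons_false]
      simp only [List.length_cons, List.drop_succ_cons]
      congr 1
      push_cast; ring

-- main invariant: from a below state at index i with start = i-1 (or 0 at the top),
-- A's residual output equals B's filtered runs of the residual list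
theorem emitA_eq_filtB (m : Int) :
    ∀ (n : Nat) (l : List Int), l.length = n → ∀ (i : Int), 0 ≤ i →
      emitA m l i (if 0 < i then i - 1 else 0) none
        = filtB (i + (l.length : Int)) (runsB m l i) := by
  intro n
  induction n using Nat.strong_induction_on with
  | _ n ih =>
    intro l hn i hi
    cases l with
    | nil => simp [emitA, runsB, filtB]
    | cons v r =>
      by_cases h : v > m
      · -- entering an above-run
        have hkt : decide (v > m) = true := by simpa using h
        rw [show emitA m (v :: r) i (if 0 < i then i - 1 else 0) none
              = emitA m r (i + 1) (if 0 < i then i - 1 else 0) (some i) from by simp [emitA, h]]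
        rw [runsB_cons]
        simp only [hkt, pred_true_eq]
        have hlen := tw_dw_length (fun y => decide (y > m)) r
        have hdrop := drop_tw_length (fun y => decide (y > m)) r
        cases hd : r.dropWhile (fun y => decide (y > m)) with
        | nil =>
          -- trailing run: A emits nothing; B filters it out (its end is the last index)
          rw [emitA_run_nil m r hd (i + 1) _ i]
          rw [hd] at hdrop hlen
          rw [hdrop]
          rw [show runsB m ([] : List Int)
                (i + (1 + ((r.takeWhile (fun y => decide (y > m))).length : Int))) = [] from by
            rw [runsB]]
          simp only [List.length_nil] at hlen
          rw [filtB_cons_last _ _ _ _ (by simp only [List.length_cons]; push_cast; omega)]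
          simp [filtB]
        | cons w d' =>
          rw [hd] at hdrop
          have hwb : decide (w > m) = false := dw_head_false _ r w d' hd
          have hwb' : ¬ w > m := by simpa using hwb
          have hll : (r.takeWhile (fun y => decide (y > m))).length + (d'.length + 1)
              = r.length := by
            rw [hd] at hlen; simpa using hlen
          rw [emitA_run_cons m r w d' hd (i + 1) _ i (by ring)]
          set T := (r.takeWhile (fun y => decide (y > m))).length with hT
          have hlt : (w :: d').length < n := by simp only [← hn, List.length_cons]; omega
          have ihw := ih (w :: d').length hlt (w :: d') rfl (i + 1 + T) (by omega)
          rw [show emitA m (w :: d') (i + 1 + (T : Int))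
                (if 0 < (i : Int) + 1 + T then i + 1 + T - 1 else 0) none
              = emitA m d' (i + 1 + T + 1) (i + 1 + T) none from by
            rw [if_pos (by omega)]
            simp [emitA, hwb']] at ihw
          rw [ihw, hdrop]
          rw [filtB_cons_true _ _ _ _ (by simp only [List.length_cons]; push_cast; omega)]
          congr 1
          · rw [Prod.mk.injEq]
            exact ⟨rfl, by ring⟩
          · congr 1
            · simp only [List.length_cons]; push_cast; omega
            · congr 1
              ring
      · -- below element: nothing emitted, start := idx
        rw [show emitA m (v :: r) i (if 0 < i then i - 1 else 0) none
              = emitA m r (i + 1) i none from by simp [emitA, h]]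
        have ihr := ih r.length (by simp [← hn]) r rfl (i + 1) (by omega)
        rw [show (if 0 < (i : Int) + 1 then i + 1 - 1 else 0) = i from by
          rw [if_pos (by omega)]; ring] at ihr
        rw [ihr, filtB_below m (i + (((v :: r).length : Nat) : Int)) v r i h]
        congr 1
        simp only [List.length_cons]; push_cast; ring

-- ===== VERDICT (by name: the statement is the Claim_ definition above) =====
theorem split_projection_list_spec : Claim_equal_split_projection_list := by
  intro l m _
  unfold Spec_split_projection_list split_projection_list split_projection_list_alt
  rw [splitLoopA_emitA]
  have h := emitA_eq_filtB m l.length l rfl 0 (le_refl 0)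
  simp only [if_neg (lt_irrefl (0 : Int)), zero_add] at h
  simpa using h
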